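-- pv_equiv track=rewrite | github.com/DynamicCodeSearch/SLACC | simple/src/main/python/Y14R5P1/Smithers/generated_py_263a1af396df4e8fa1f96950f5309feb.py | func_acafa283124e472ea282d1bf82a46e9c
-- ===== SOURCE A (Python) =====
-- def func_acafa283124e472ea282d1bf82a46e9c(s, p, r, n, q):
--     dev = [((i * p + q) % r + s) for i in range(n)]
--     tot = sum(dev)
--     i = 0
--     j = n - 1
--     ltot = 0
--     mtot = tot
--     rtot = 0
--     return dev
-- ===== SOURCE B (Python) =====
-- def func_acafa283124e472ea282d1bf82a46e9c(s, p, r, n, q):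
--     if n <= 0:
--         return []
--     out = []
--     v = q % r
--     for _ in range(n):
--         out.append(v + s)
--         v = (v + p) % r
--     return out
-- ===== Notes on version B (the rewrite author's own statement) =====
-- stated objective: alternative
-- what changed: B replaces A's per-index formula (i*p+q)%r+s over range(n) by a running modular accumulator v=(v+p)%r seeded with q%r, and drops A's dead tot/i/j/ltot/mtot/rtot bookkeeping.
import Mathlib
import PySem

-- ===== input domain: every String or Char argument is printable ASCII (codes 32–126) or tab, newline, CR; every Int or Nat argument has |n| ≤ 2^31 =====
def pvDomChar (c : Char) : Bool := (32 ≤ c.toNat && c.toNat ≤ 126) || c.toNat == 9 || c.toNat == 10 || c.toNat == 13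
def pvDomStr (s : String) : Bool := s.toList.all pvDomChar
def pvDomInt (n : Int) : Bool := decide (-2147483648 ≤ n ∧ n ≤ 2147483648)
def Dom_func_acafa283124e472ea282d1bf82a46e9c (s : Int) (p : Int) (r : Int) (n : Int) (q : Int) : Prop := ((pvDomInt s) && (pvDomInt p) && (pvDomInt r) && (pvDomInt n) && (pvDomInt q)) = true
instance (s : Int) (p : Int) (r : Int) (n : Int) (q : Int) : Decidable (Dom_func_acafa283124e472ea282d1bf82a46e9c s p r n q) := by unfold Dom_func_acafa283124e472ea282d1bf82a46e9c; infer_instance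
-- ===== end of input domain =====

-- B computes the same list with a running modular accumulator v=(v+p)%r (seeded with q%r) instead of A's per-index formula, dropping A's dead tot/i/j/ltot/mtot/rtot locals; objective: alternative decomposition.


-- ===== PORT A =====
def func_acafa283124e472ea282d1bf82a46e9c (s : Int) (p : Int) (r : Int) (n : Int) (q : Int) : List Int :=
  let dev := (PySem.List.pyRange 0 n 1).map (fun i => PySem.Int.mod (i * p + q) r + s)
  let tot := dev.sum
  let _i : Int := 0
  let _j : Int := n - 1
  let _ltot : Int := 0
  let _mtot := tot
  let _rtot : Int := 0
  dev

-- ===== PORT B =====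
def pvAltLoop (s : Int) (p : Int) (r : Int) : Nat → Int → List Int
  | 0, _ => []
  | Nat.succ k, v => (v + s) :: pvAltLoop s p r k (PySem.Int.mod (v + p) r)

def func_acafa283124e472ea282d1bf82a46e9c_alt (s : Int) (p : Int) (r : Int) (n : Int) (q : Int) : List Int :=
  if n ≤ 0 then []
  else pvAltLoop s p r n.toNat (PySem.Int.mod q r)

-- ===== PRECONDITION & SPEC =====
-- Pre_ excludes exactly the inputs (r = 0 with n > 0) on which Python A raises ZeroDivisionError.
def Pre_func_acafa283124e472ea282d1bf82a46e9c (s : Int) (p : Int) (r : Int) (n : Int) (q : Int) : Prop := r ≠ 0 ∨ n ≤ 0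
instance (s : Int) (p : Int) (r : Int) (n : Int) (q : Int) : Decidable (Pre_func_acafa283124e472ea282d1bf82a46e9c s p r n q) := by unfold Pre_func_acafa283124e472ea282d1bf82a46e9c; infer_instance
def pvWitness_func_acafa283124e472ea282d1bf82a46e9c : Int × Int × Int × Int × Int := (2, 3, 5, 4, 7)

def Spec_func_acafa283124e472ea282d1bf82a46e9c (s : Int) (p : Int) (r : Int) (n : Int) (q : Int) (out : List Int) : Prop := out = func_acafa283124e472ea282d1bf82a46e9c_alt s p r n q
instance (s : Int) (p : Int) (r : Int) (n : Int) (q : Int) (out : List Int) : Decidable (Spec_func_acafa283124e472ea282d1bf82a46e9c s p r n q out) := by unfold Spec_func_acafa283124e472ea282d1bf82a46e9c; infer_instance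

-- ===== CLAIM (what is proved, stated in full; the proofs are below) =====
def Claim_equal_func_acafa283124e472ea282d1bf82a46e9c : Prop := ∀ (s : Int) (p : Int) (r : Int) (n : Int) (q : Int), Dom_func_acafa283124e472ea282d1bf82a46e9c s p r n q → Pre_func_acafa283124e472ea282d1bf82a46e9c s p r n q → Spec_func_acafa283124e472ea282d1bf82a46e9c s p r n q (func_acafa283124e472ea282d1bf82a46e9c s p r n q)

-- ===== LEMMAS AND PROOFS =====
theorem pvMod_is_fmod (a b : Int) : PySem.Int.mod a b = Int.fmod a b := rfl

-- reseeding the accumulator with fmod of a congruent value does not change it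
theorem pvFmod_absorb (a p r : Int) : Int.fmod (Int.fmod a r + p) r = Int.fmod (a + p) r := by
  conv_rhs => rw [← Int.fmod_add_mul_fdiv a r]
  rw [show Int.fmod a r + r * Int.fdiv a r + p = Int.fmod a r + p + r * Int.fdiv a r by ring,
      Int.add_mul_fmod_self_left]

-- the accumulator loop, seeded at step i, produces the per-index values
theorem pvAltLoop_eq (s p r : Int) (m : Nat) : ∀ (a : Int),
    pvAltLoop s p r m (Int.fmod a r) =
      (List.range m).map (fun (k : Nat) => Int.fmod ((k : Int) * p + a) r + s) := by
  induction m with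
  | zero => intro a; simp [pvAltLoop]
  | succ k ih =>
    intro a
    rw [List.range_succ_eq_map]
    simp only [pvAltLoop, pvMod_is_fmod, List.map_cons, List.map_map]
    congr 1
    · simp
    · rw [pvFmod_absorb, show a + p = p + a by ring, ih (p + a)]
      apply List.map_congr_left
      intro k _
      simp only [Function.comp]
      push_cast
      ring_nf

theorem func_acafa283124e472ea282d1bf82a46e9c_spec : Claim_equal_func_acafa283124e472ea282d1bf82a46e9c := by
  intro s p r n q _ _
  unfold Spec_func_acafa283124e472ea282d1bf82a46e9c
  unfold func_acafa283124e472ea282d1bf82a46e9c func_acafa283124e472ea282d1bf82a46e9c_alt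
  by_cases hn : n ≤ 0
  · simp [hn]
  · simp only [if_neg hn]
    rw [show PySem.Int.mod q r = Int.fmod q r from rfl, pvAltLoop_eq s p r n.toNat q,
        PySem.List.pyRange_one, show (n - 0).toNat = n.toNat by omega, List.map_map]
    apply List.map_congr_left
    intro k hk
    simp only [Function.comp, pvMod_is_fmod, zero_add]
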